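-- pv_equiv track=rewrite | github.com/anshu787/hacknova_ps | backend/llm_chatbot.py | build_scan_context
-- ===== SOURCE A (Python) =====
-- from typing import List, Optional, Tuple
--
-- def build_scan_context(vulnerabilities: List[dict]) -> str:
--     """Build a concise scan context string from vulnerability records."""
--     if not vulnerabilities:
--         return ""
--
--     lines = [f"Target scan found {len(vulnerabilities)} findings:"]
--
--     # Group by severity
--     by_severity = {}
--     for v in vulnerabilities:
--         sev = v.get("severity", "info")
--         by_severity.setdefault(sev, []).append(v)
--
--     for sev in ["critical", "high", "medium", "low", "info"]:
--         items = by_severity.get(sev, [])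
--         if items:
--             lines.append(f"\n{sev.upper()} ({len(items)}):")
--             for v in items[:3]:  # Top 3 per severity
--                 cve = v.get("cve_id", "")
--                 name = v.get("name", "")[:60]
--                 host = v.get("host", "")
--                 port = v.get("port", "")
--                 lines.append(f"  - {name} {'('+cve+')' if cve else ''} on {host}:{port}")
--
--     return "\n".join(lines)
-- ===== SOURCE B (Python) =====
-- # B: drops A's grouping dict; one filter pass per fixed severity, blocks concatenated.
-- def _format_line(v):
--     cve = v.get("cve_id", "")
--     name = v.get("name", "")[:60]
--     host = v.get("host", "")
--     port = v.get("port", "")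
--     return f"  - {name} {'('+cve+')' if cve else ''} on {host}:{port}"
--
-- def _block(vulnerabilities, sev):
--     matches = [v for v in vulnerabilities if v.get("severity", "info") == sev]
--     if not matches:
--         return []
--     return [f"\n{sev.upper()} ({len(matches)}):"] + [_format_line(v) for v in matches[:3]]
--
-- def build_scan_context(vulnerabilities):
--     if not vulnerabilities:
--         return ""
--     parts = [f"Target scan found {len(vulnerabilities)} findings:"]
--     for sev in ["critical", "high", "medium", "low", "info"]:
--         parts += _block(vulnerabilities, sev)
--     return "\n".join(parts)
-- ===== Notes on version B (the rewrite author's own statement) =====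
-- stated objective: simpler
-- what changed: B removes A's grouping dict (setdefault/append pass + per-severity lookup) and instead filters the vulnerability list once per fixed severity, concatenating per-severity blocks built by a helper.
import Mathlib
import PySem

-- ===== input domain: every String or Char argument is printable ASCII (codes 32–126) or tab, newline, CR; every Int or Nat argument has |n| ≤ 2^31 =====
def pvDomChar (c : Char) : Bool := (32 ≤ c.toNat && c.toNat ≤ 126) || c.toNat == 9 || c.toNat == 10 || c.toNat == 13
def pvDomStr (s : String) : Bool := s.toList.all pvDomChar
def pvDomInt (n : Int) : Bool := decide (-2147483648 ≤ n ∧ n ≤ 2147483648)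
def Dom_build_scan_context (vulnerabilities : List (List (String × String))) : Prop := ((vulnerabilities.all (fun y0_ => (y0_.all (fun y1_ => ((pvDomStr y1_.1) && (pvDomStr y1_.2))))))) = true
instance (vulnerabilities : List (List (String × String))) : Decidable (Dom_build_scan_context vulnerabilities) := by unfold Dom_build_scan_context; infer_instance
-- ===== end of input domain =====

-- B drops A's grouping dict and instead filters the list once per fixed severity (simpler decomposition).

-- shared helper: Python's v.get(k, dflt) on a dict record (first match in insertion order)
def pvGet (v : List (String × String)) (k dflt : String) : String :=
  (PySem.Dict.mk v).getD k dflt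

-- shared helper: the per-vulnerability formatted line (identical f-string in A and B)
def pvLine (v : List (String × String)) : String :=
  let cve := pvGet v "cve_id" ""
  let name := PySem.Str.slice (pvGet v "name" "") none (some 60)
  let host := pvGet v "host" ""
  let port := pvGet v "port" ""
  "  - " ++ name ++ " " ++ (if cve = "" then "" else "(" ++ cve ++ ")") ++ " on " ++ host ++ ":" ++ port

-- ===== PORT A =====
def build_scan_context (vulnerabilities : List (List (String × String))) : String :=
  if vulnerabilities = [] then ""
  else
    let lines0 : List String :=
      ["Target scan found " ++ PySem.Int.toStr (vulnerabilities.length) ++ " findings:"]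
    -- by_severity.setdefault(sev, []).append(v)  ==  d[sev] = d.get(sev, []) + [v]
    let by_severity : PySem.Dict String (List (List (String × String))) :=
      vulnerabilities.foldl
        (fun d v => d.modify (pvGet v "severity" "info") [] (· ++ [v])) PySem.Dict.empty
    let lines :=
      ["critical", "high", "medium", "low", "info"].foldl
        (fun ls sev =>
          let items := by_severity.getD sev []
          if items = [] then ls
          else
            (PySem.List.slice items none (some 3)).foldl (fun acc v => acc ++ [pvLine v])
              (ls ++ ["\n" ++ PySem.Str.upper sev ++ " (" ++ PySem.Int.toStr items.length ++ "):"]))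
        lines0
    PySem.Str.join "\n" lines

-- ===== PORT B =====
def pvBlock (vulnerabilities : List (List (String × String))) (sev : String) : List String :=
  let matched := vulnerabilities.filter (fun v => pvGet v "severity" "info" == sev)
  if matched = [] then []
  else
    ("\n" ++ PySem.Str.upper sev ++ " (" ++ PySem.Int.toStr matched.length ++ "):")
      :: (PySem.List.slice matched none (some 3)).map pvLine

def build_scan_context_alt (vulnerabilities : List (List (String × String))) : String :=
  if vulnerabilities = [] then ""
  else
    PySem.Str.join "\n"
      (("Target scan found " ++ PySem.Int.toStr (vulnerabilities.length) ++ " findings:")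
        :: (["critical", "high", "medium", "low", "info"].flatMap (pvBlock vulnerabilities)))

-- ===== PRECONDITION & SPEC =====
def Spec_build_scan_context (vulnerabilities : List (List (String × String))) (out : String) : Prop := out = build_scan_context_alt vulnerabilities
instance (vulnerabilities : List (List (String × String))) (out : String) : Decidable (Spec_build_scan_context vulnerabilities out) := by unfold Spec_build_scan_context; infer_instance

-- ===== CLAIM (what is proved, stated in full; the proofs are below) =====
def Claim_equal_build_scan_context : Prop := ∀ (vulnerabilities : List (List (String × String))), Dom_build_scan_context vulnerabilities → Spec_build_scan_context vulnerabilities (build_scan_context vulnerabilities)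

-- ===== LEMMAS AND PROOFS =====

theorem pv_group_getD (vs : List (List (String × String))) (sev : String) :
    (vs.foldl (fun d v => d.modify (pvGet v "severity" "info") [] (· ++ [v]))
        (PySem.Dict.empty : PySem.Dict String (List (List (String × String))))).getD sev []
      = vs.filter (fun v => pvGet v "severity" "info" == sev) := by
  have h := PySem.Dict.getD_foldl_modify_append
    (l := vs.map (fun v => (pvGet v "severity" "info", v)))
    (d := (PySem.Dict.empty : PySem.Dict String (List (List (String × String)))))
    (c := sev)
  rw [List.foldl_map] at h
  rw [h]
  simp [List.filter_map, Function.comp_def]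

theorem pv_step (vs : List (List (String × String))) (acc : List String) (sev : String) :
    (if (vs.foldl (fun d v => d.modify (pvGet v "severity" "info") [] (· ++ [v]))
          (PySem.Dict.empty : PySem.Dict String (List (List (String × String))))).getD sev [] = []
     then acc
     else
       (PySem.List.slice
           ((vs.foldl (fun d v => d.modify (pvGet v "severity" "info") [] (· ++ [v]))
               (PySem.Dict.empty : PySem.Dict String (List (List (String × String))))).getD sev [])
           none (some 3)).foldl (fun a v => a ++ [pvLine v])
         (acc ++ ["\n" ++ PySem.Str.upper sev ++ " (" ++
             PySem.Int.toStr
               ((vs.foldl (fun d v => d.modify (pvGet v "severity" "info") [] (· ++ [v]))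
                   (PySem.Dict.empty : PySem.Dict String (List (List (String × String))))).getD sev []).length ++ "):"]))
      = acc ++ pvBlock vs sev := by
  simp only [pv_group_getD, pvBlock]
  by_cases hm : vs.filter (fun v => pvGet v "severity" "info" == sev) = []
  · simp [hm]
  · simp only [if_neg hm, PySem.List.foldl_append_singleton_eq_map]
    simp

theorem pv_main (vs : List (List (String × String))) :
    build_scan_context vs = build_scan_context_alt vs := by
  unfold build_scan_context build_scan_context_alt
  by_cases h : vs = []
  · simp [h]
  · simp only [if_neg h]
    congr 1
    simp only [List.foldl_cons, List.foldl_nil, List.flatMap_cons, List.flatMap_nil]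
    rw [pv_step, pv_step, pv_step, pv_step, pv_step]
    simp [List.append_assoc]

theorem build_scan_context_spec : Claim_equal_build_scan_context := by
  intro vs _
  exact pv_main vs
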